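-- pv_equiv track=rewrite | github.com/Basim-23/Flux-DFT | src/fluxdft/core/scf_generator.py | is_metallic_heuristic
-- ===== SOURCE A (Python) =====
-- from typing import Dict, List, Optional, Set, Tuple, Any
--
-- ELEMENTS_3D = {'Sc', 'Ti', 'V', 'Cr', 'Mn', 'Fe', 'Co', 'Ni', 'Cu', 'Zn'}
--
-- ELEMENTS_4D = {'Y', 'Zr', 'Nb', 'Mo', 'Tc', 'Ru', 'Rh', 'Pd', 'Ag', 'Cd'}
--
-- ELEMENTS_5D = {'La', 'Hf', 'Ta', 'W', 'Re', 'Os', 'Ir', 'Pt', 'Au', 'Hg'}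
--
-- SIMPLE_METALS = {'Li', 'Na', 'K', 'Rb', 'Cs', 'Be', 'Mg', 'Ca', 'Sr', 'Ba', 'Al', 'Ga', 'In', 'Tl', 'Sn', 'Pb', 'Bi'}
--
-- INSULATORS = {'He', 'Ne', 'Ar', 'Kr', 'Xe', 'F', 'Cl', 'Br', 'I'}
--
-- def is_metallic_heuristic(elements: List[str]) -> bool:
--     """
--     Heuristic to detect if system is likely metallic.
--
--     Returns True if:
--     - Contains simple metals (alkali, alkaline earth, Al, etc.)
--     - Contains transition metals (likely metallic unless oxide)
--     - Does NOT contain only clear insulators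
--     """
--     has_metal = any(el in SIMPLE_METALS for el in elements)
--     has_transition = any(el in (ELEMENTS_3D | ELEMENTS_4D | ELEMENTS_5D) for el in elements)
--     all_insulator = all(el in INSULATORS for el in elements)
--
--     # If it has metals or transition metals and isn't purely insulating
--     if all_insulator:
--         return False
--
--     # More nuanced: oxides of transition metals are often insulators
--     has_oxygen = 'O' in elements
--     has_only_tm_and_o = all(el in (ELEMENTS_3D | ELEMENTS_4D | ELEMENTS_5D | {'O'}) for el in elements)
--     if has_only_tm_and_o and has_oxygen:
--         # Transition metal oxide - likely insulator or small gap
--         return False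
--
--     return has_metal or has_transition
-- ===== SOURCE B (Python) =====
-- # B: classify each element once into a disjoint category code, OR the codes
-- # into a single bitmask, then decide by bitmask arithmetic.
-- ELEMENTS_3D = {'Sc', 'Ti', 'V', 'Cr', 'Mn', 'Fe', 'Co', 'Ni', 'Cu', 'Zn'}
-- ELEMENTS_4D = {'Y', 'Zr', 'Nb', 'Mo', 'Tc', 'Ru', 'Rh', 'Pd', 'Ag', 'Cd'}
-- ELEMENTS_5D = {'La', 'Hf', 'Ta', 'W', 'Re', 'Os', 'Ir', 'Pt', 'Au', 'Hg'}
-- SIMPLE_METALS = {'Li', 'Na', 'K', 'Rb', 'Cs', 'Be', 'Mg', 'Ca', 'Sr', 'Ba', 'Al', 'Ga', 'In', 'Tl', 'Sn', 'Pb', 'Bi'}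
-- INSULATORS = {'He', 'Ne', 'Ar', 'Kr', 'Xe', 'F', 'Cl', 'Br', 'I'}
-- TRANSITION = ELEMENTS_3D | ELEMENTS_4D | ELEMENTS_5D
--
-- METAL, TRANS, INS, OXY, OTHER = 1, 2, 4, 8, 16
--
--
-- def _classify(el):
--     """Each element belongs to exactly one category (the sets are disjoint)."""
--     if el in SIMPLE_METALS:
--         return METAL
--     if el in TRANSITION:
--         return TRANS
--     if el in INSULATORS:
--         return INS
--     if el == 'O':
--         return OXY
--     return OTHER
--
--
-- def is_metallic_heuristic(elements):
--     mask = 0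
--     for el in elements:
--         mask |= _classify(el)
--     if mask & (METAL | TRANS | OXY | OTHER) == 0:
--         return False          # nothing but insulators (or empty)
--     if mask & OXY and mask & (METAL | INS | OTHER) == 0:
--         return False          # transition-metal oxide
--     return bool(mask & (METAL | TRANS))
-- ===== Notes on version B (the rewrite author's own statement) =====
-- stated objective: faster
-- what changed: Instead of A's five separate any/all/membership scans of the list with set unions rebuilt per call, B classifies each element once into one of five disjoint category codes (metal/transition/insulator/oxygen/other), ORs the codes into a single bitmask in one pass, and reads the verdict off the mask with bitwise tests.
import Mathlib
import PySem

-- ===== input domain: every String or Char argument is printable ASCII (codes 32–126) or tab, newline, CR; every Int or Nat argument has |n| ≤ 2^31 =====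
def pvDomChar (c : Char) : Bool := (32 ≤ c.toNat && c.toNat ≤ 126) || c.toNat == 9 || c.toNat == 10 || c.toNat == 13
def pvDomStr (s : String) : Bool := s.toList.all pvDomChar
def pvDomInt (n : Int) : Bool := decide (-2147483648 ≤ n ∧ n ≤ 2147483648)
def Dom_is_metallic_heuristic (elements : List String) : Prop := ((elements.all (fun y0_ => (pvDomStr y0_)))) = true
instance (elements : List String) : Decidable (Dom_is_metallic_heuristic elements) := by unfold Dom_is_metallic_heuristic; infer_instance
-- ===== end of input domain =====

-- B replaces A's five scans and flag logic by one classification of each element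
-- into a disjoint category code, a bitmask union, and bitwise tests (objective: alternative).

-- ===== PORT A =====
def pvSIMPLE_METALS : List String :=
  ["Li", "Na", "K", "Rb", "Cs", "Be", "Mg", "Ca", "Sr", "Ba", "Al", "Ga", "In", "Tl", "Sn", "Pb", "Bi"]
def pvTRANSITION : List String :=
  ["Sc", "Ti", "V", "Cr", "Mn", "Fe", "Co", "Ni", "Cu", "Zn",
   "Y", "Zr", "Nb", "Mo", "Tc", "Ru", "Rh", "Pd", "Ag", "Cd",
   "La", "Hf", "Ta", "W", "Re", "Os", "Ir", "Pt", "Au", "Hg"]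
def pvINSULATORS : List String := ["He", "Ne", "Ar", "Kr", "Xe", "F", "Cl", "Br", "I"]

def is_metallic_heuristic (elements : List String) : Bool :=
  let has_metal := elements.any (fun el => pvSIMPLE_METALS.contains el)
  let has_transition := elements.any (fun el => pvTRANSITION.contains el)
  let all_insulator := elements.all (fun el => pvINSULATORS.contains el)
  if all_insulator then false
  else
    let has_oxygen := elements.contains "O"
    let has_only_tm_and_o := elements.all (fun el => (pvTRANSITION ++ ["O"]).contains el)
    if has_only_tm_and_o && has_oxygen then false
    else has_metal || has_transition

-- ===== PORT B =====
-- each element is in exactly one category; codes METAL=1 TRANS=2 INS=4 OXY=8 OTHER=16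
def pvClassify (el : String) : Nat :=
  if pvSIMPLE_METALS.contains el then 1
  else if pvTRANSITION.contains el then 2
  else if pvINSULATORS.contains el then 4
  else if el == "O" then 8
  else 16

def is_metallic_heuristic_alt (elements : List String) : Bool :=
  let mask := elements.foldl (fun m el => m ||| pvClassify el) 0
  if mask &&& 27 == 0 then false               -- METAL|TRANS|OXY|OTHER = 27
  else if (mask &&& 8 != 0) && (mask &&& 21 == 0) then false   -- OXY; METAL|INS|OTHER = 21
  else mask &&& 3 != 0                          -- METAL|TRANS = 3

-- ===== PRECONDITION & SPEC =====
def Spec_is_metallic_heuristic (elements : List String) (out : Bool) : Prop := out = is_metallic_heuristic_alt elements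
instance (elements : List String) (out : Bool) : Decidable (Spec_is_metallic_heuristic elements out) := by unfold Spec_is_metallic_heuristic; infer_instance

-- ===== CLAIM (what is proved, stated in full; the proofs are below) =====
def Claim_equal_is_metallic_heuristic : Prop := ∀ (elements : List String), Dom_is_metallic_heuristic elements → Spec_is_metallic_heuristic elements (is_metallic_heuristic elements)

-- ===== LEMMAS AND PROOFS =====

-- the five per-element predicates (first four are A's membership tests, the fifth 'other')
def pvPm (el : String) : Bool := pvSIMPLE_METALS.contains el
def pvPt (el : String) : Bool := pvTRANSITION.contains el
def pvPi (el : String) : Bool := pvINSULATORS.contains el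
def pvPo (el : String) : Bool := el == "O"
def pvPx (el : String) : Bool := !pvPm el && !pvPt el && !pvPi el && !pvPo el

def pvMaskOf (a b c d e : Bool) : Nat :=
  (if a then 1 else 0) ||| (if b then 2 else 0) ||| (if c then 4 else 0) |||
  (if d then 8 else 0) ||| (if e then 16 else 0)

-- disjointness of the literal element sets
theorem pv_m_not_t (el : String) (h : pvPm el = true) : pvPt el = false := by
  simp [pvPm, pvSIMPLE_METALS] at h
  rcases h with rfl|rfl|rfl|rfl|rfl|rfl|rfl|rfl|rfl|rfl|rfl|rfl|rfl|rfl|rfl|rfl|rfl <;> decide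

theorem pv_m_not_i (el : String) (h : pvPm el = true) : pvPi el = false := by
  simp [pvPm, pvSIMPLE_METALS] at h
  rcases h with rfl|rfl|rfl|rfl|rfl|rfl|rfl|rfl|rfl|rfl|rfl|rfl|rfl|rfl|rfl|rfl|rfl <;> decide

theorem pv_m_not_o (el : String) (h : pvPm el = true) : pvPo el = false := by
  simp [pvPm, pvSIMPLE_METALS] at h
  rcases h with rfl|rfl|rfl|rfl|rfl|rfl|rfl|rfl|rfl|rfl|rfl|rfl|rfl|rfl|rfl|rfl|rfl <;> decide

theorem pv_t_not_i (el : String) (h : pvPt el = true) : pvPi el = false := by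
  simp [pvPt, pvTRANSITION] at h
  rcases h with rfl|rfl|rfl|rfl|rfl|rfl|rfl|rfl|rfl|rfl|rfl|rfl|rfl|rfl|rfl|rfl|rfl|rfl|rfl|rfl|rfl|rfl|rfl|rfl|rfl|rfl|rfl|rfl|rfl|rfl <;> decide

theorem pv_t_not_o (el : String) (h : pvPt el = true) : pvPo el = false := by
  simp [pvPt, pvTRANSITION] at h
  rcases h with rfl|rfl|rfl|rfl|rfl|rfl|rfl|rfl|rfl|rfl|rfl|rfl|rfl|rfl|rfl|rfl|rfl|rfl|rfl|rfl|rfl|rfl|rfl|rfl|rfl|rfl|rfl|rfl|rfl|rfl <;> decide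

theorem pv_i_not_o (el : String) (h : pvPi el = true) : pvPo el = false := by
  simp [pvPi, pvINSULATORS] at h
  rcases h with rfl|rfl|rfl|rfl|rfl|rfl|rfl|rfl|rfl <;> decide

-- the classifier computes the per-element bitmask of the five predicates
theorem pvClassify_eq (el : String) :
    pvClassify el = pvMaskOf (pvPm el) (pvPt el) (pvPi el) (pvPo el) (pvPx el) := by
  unfold pvClassify pvMaskOf pvPx
  by_cases hm : pvPm el = true
  · have := pv_m_not_t el hm; have := pv_m_not_i el hm; have := pv_m_not_o el hm
    simp_all [pvPm, pvPt, pvPi, pvPo]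
  · by_cases ht : pvPt el = true
    · have := pv_t_not_i el ht; have := pv_t_not_o el ht
      simp_all [pvPm, pvPt, pvPi, pvPo]
    · by_cases hi : pvPi el = true
      · have := pv_i_not_o el hi
        simp_all [pvPm, pvPt, pvPi, pvPo]
      · by_cases ho : pvPo el = true <;> simp_all [pvPm, pvPt, pvPi, pvPo]

theorem pvMaskOf_lor (a b c d e a' b' c' d' e' : Bool) :
    pvMaskOf a b c d e ||| pvMaskOf a' b' c' d' e' =
      pvMaskOf (a || a') (b || b') (c || c') (d || d') (e || e') := by
  cases a <;> cases b <;> cases c <;> cases d <;> cases e <;>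
    cases a' <;> cases b' <;> cases c' <;> cases d' <;> cases e' <;> decide

theorem pvFold_hoist (l : List String) (m : Nat) :
    l.foldl (fun m el => m ||| pvClassify el) m =
      m ||| l.foldl (fun m el => m ||| pvClassify el) 0 := by
  induction l generalizing m with
  | nil => simp
  | cons x xs ih =>
      simp only [List.foldl_cons]
      rw [ih (m ||| pvClassify x), ih (0 ||| pvClassify x)]
      simp [Nat.or_assoc]

-- the mask is the bitmask of the five list-level 'any' booleans
theorem pvMask_eq (l : List String) :
    l.foldl (fun m el => m ||| pvClassify el) 0 =
      pvMaskOf (l.any pvPm) (l.any pvPt) (l.any pvPi) (l.any pvPo) (l.any pvPx) := by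
  induction l with
  | nil => decide
  | cons x xs ih =>
      simp only [List.foldl_cons, List.any_cons]
      rw [pvFold_hoist, ih, Nat.zero_or, pvClassify_eq, pvMaskOf_lor]

-- A's two 'all' tests expressed through the five 'any' booleans
theorem pv_all_ins (l : List String) :
    l.all (fun el => pvINSULATORS.contains el) =
      !(l.any pvPm || l.any pvPt || l.any pvPo || l.any pvPx) := by
  induction l with
  | nil => rfl
  | cons x xs ih =>
      simp only [List.all_cons, List.any_cons, ih]
      have hx : pvINSULATORS.contains x = (!pvPm x && !pvPt x && !pvPo x && !pvPx x) := by
        by_cases hi : pvPi x = true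
        · have := pv_i_not_o x hi
          by_cases hm : pvPm x = true
          · have := pv_m_not_i x hm; simp_all [pvPi]
          · by_cases ht : pvPt x = true
            · have := pv_t_not_i x ht; simp_all [pvPi]
            · simp_all [pvPi, pvPx, pvPm, pvPt]
        · by_cases hm : pvPm x = true <;> by_cases ht : pvPt x = true <;>
            by_cases ho : pvPo x = true <;> simp_all [pvPi, pvPx]
      rw [hx]
      cases pvPm x <;> cases pvPt x <;> cases pvPo x <;> cases pvPx x <;>
        cases xs.any pvPm <;> cases xs.any pvPt <;> cases xs.any pvPo <;> cases xs.any pvPx <;> rfl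

theorem pv_all_tmo (l : List String) :
    l.all (fun el => (pvTRANSITION ++ ["O"]).contains el) =
      !(l.any pvPm || l.any pvPi || l.any pvPx) := by
  induction l with
  | nil => rfl
  | cons x xs ih =>
      simp only [List.all_cons, List.any_cons, ih]
      have hx : (pvTRANSITION ++ ["O"]).contains x = (!pvPm x && !pvPi x && !pvPx x) := by
        have hsplit : (pvTRANSITION ++ ["O"]).contains x = (pvPt x || pvPo x) := by
          cases h : x == "O" <;> simp_all [pvPt, pvPo]
        rw [hsplit]
        by_cases ht : pvPt x = true
        · have := pv_t_not_i x ht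
          by_cases hm : pvPm x = true
          · have := pv_m_not_t x hm; simp_all
          · simp_all [pvPx]
        · by_cases ho : pvPo x = true
          · have hi : pvPi x = false := by
              by_cases hi : pvPi x = true
              · have := pv_i_not_o x hi; simp_all
              · simp_all
            have hm : pvPm x = false := by
              by_cases hm : pvPm x = true
              · have := pv_m_not_o x hm; simp_all
              · simp_all
            simp_all [pvPx]
          · by_cases hm : pvPm x = true <;> by_cases hi : pvPi x = true <;> simp_all [pvPx]
      rw [hx]
      cases pvPm x <;> cases pvPi x <;> cases pvPx x <;>
        cases xs.any pvPm <;> cases xs.any pvPi <;> cases xs.any pvPx <;> rfl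

theorem pv_contains_O (l : List String) : l.contains "O" = l.any pvPo := by
  induction l with
  | nil => rfl
  | cons x xs ih =>
      simp only [List.contains_cons, List.any_cons, ih, pvPo]
      cases h : (x == "O") <;> simp_all [BEq.comm]

-- ===== VERDICT (by name: the statement is the Claim_ definition above) =====
theorem is_metallic_heuristic_spec : Claim_equal_is_metallic_heuristic := by
  intro elements _
  unfold Spec_is_metallic_heuristic is_metallic_heuristic is_metallic_heuristic_alt
  simp only [pvMask_eq, pv_all_ins, pv_all_tmo, pv_contains_O,
    show (fun el => pvSIMPLE_METALS.contains el) = pvPm from rfl,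
    show (fun el => pvTRANSITION.contains el) = pvPt from rfl]
  cases elements.any pvPm <;> cases elements.any pvPt <;> cases elements.any pvPi <;>
    cases elements.any pvPo <;> cases elements.any pvPx <;> decide
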